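-- pv_equiv track=rewrite | github.com/Mehfila-Parkkulthil/normal-form-game-solver | 3.prisoner_dilemma_advanced.py | best_responses_p2
-- ===== SOURCE A (Python) =====
-- def best_responses_p2(strategies, payoff_matrix, p1_strategy):
--     best_payoff = None
--     best_moves = []
--     for s2 in strategies:
--         p2_payoff = payoff_matrix[(p1_strategy, s2)][1]
--         if best_payoff is None or p2_payoff > best_payoff:
--             best_payoff = p2_payoff
--             best_moves = [s2]
--         elif p2_payoff == best_payoff:
--             best_moves.append(s2)
--     return best_moves
-- ===== SOURCE B (Python) =====
-- def best_responses_p2(strategies, payoff_matrix, p1_strategy):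
--     if not strategies:
--         return []
--     best = max(payoff_matrix[(p1_strategy, s2)][1] for s2 in strategies)
--     return [s2 for s2 in strategies if payoff_matrix[(p1_strategy, s2)][1] == best]
-- ===== Notes on version B (the rewrite author's own statement) =====
-- stated objective: simpler
-- what changed: Replaces A's single fused argmax loop with mutable best/reset state by two plain passes: a max over the p2 payoffs, then a filter keeping the strategies attaining it.
import Mathlib
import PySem

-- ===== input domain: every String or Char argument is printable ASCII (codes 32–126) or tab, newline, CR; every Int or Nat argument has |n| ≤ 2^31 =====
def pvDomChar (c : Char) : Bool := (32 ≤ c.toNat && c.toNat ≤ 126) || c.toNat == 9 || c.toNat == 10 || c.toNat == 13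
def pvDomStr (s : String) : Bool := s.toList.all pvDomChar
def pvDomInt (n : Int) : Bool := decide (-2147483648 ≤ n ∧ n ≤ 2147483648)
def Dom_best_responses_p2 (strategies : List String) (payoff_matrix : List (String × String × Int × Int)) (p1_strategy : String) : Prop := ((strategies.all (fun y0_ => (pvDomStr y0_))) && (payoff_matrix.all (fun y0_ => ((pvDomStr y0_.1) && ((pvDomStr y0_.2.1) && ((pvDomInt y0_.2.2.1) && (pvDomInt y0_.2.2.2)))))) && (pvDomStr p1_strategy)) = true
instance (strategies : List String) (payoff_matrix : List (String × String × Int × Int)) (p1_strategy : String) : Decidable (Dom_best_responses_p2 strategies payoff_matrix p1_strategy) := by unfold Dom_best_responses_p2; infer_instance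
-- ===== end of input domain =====

-- B replaces A's fused argmax-with-ties loop by two plain passes (max, then filter); same cost, simpler.
-- payoff_matrix is a Python dict keyed by (p1, s2): ported as an association list, lookup = first match.
-- A missing key raises KeyError in Python; such inputs are excluded by Pre_ (the ports return the current
-- accumulator / use 0 there, which is never observed inside Pre_).

-- shared dict-lookup helper: payoff_matrix[(p1, s2)][1], none = KeyError
def pvPay? (payoff_matrix : List (String × String × Int × Int)) (p1 s2 : String) : Option Int :=
  match payoff_matrix with
  | [] => none
  | (a, b, _, q) :: rest => if a = p1 ∧ b = s2 then some q else pvPay? rest p1 s2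

-- ===== PORT A =====
-- the loop body of A: state = (best_payoff : Option Int, best_moves)
def pvStepA (payoff_matrix : List (String × String × Int × Int)) (p1_strategy : String)
    (st : Option Int × List String) (s2 : String) : Option Int × List String :=
  let p2_payoff := (pvPay? payoff_matrix p1_strategy s2).getD 0
  match st.1 with
  | none => (some p2_payoff, [s2])
  | some b =>
    if p2_payoff > b then (some p2_payoff, [s2])
    else if p2_payoff = b then (some b, st.2 ++ [s2])
    else st

def best_responses_p2 (strategies : List String) (payoff_matrix : List (String × String × Int × Int)) (p1_strategy : String) : List String :=
  (strategies.foldl (pvStepA payoff_matrix p1_strategy) (none, [])).2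

-- ===== PORT B =====
def best_responses_p2_alt (strategies : List String) (payoff_matrix : List (String × String × Int × Int)) (p1_strategy : String) : List String :=
  match strategies with
  | [] => []
  | s :: rest =>
    let pay := fun s2 => (pvPay? payoff_matrix p1_strategy s2).getD 0
    let best := rest.foldl (fun m s2 => max m (pay s2)) (pay s)   -- max(...) over a nonempty list
    strategies.filter (fun s2 => pay s2 = best)

-- ===== PRECONDITION & SPEC =====
-- Pre_ excludes exactly the inputs where Python A raises KeyError: some strategy s2 with
-- (p1_strategy, s2) not a key of payoff_matrix.
def Pre_best_responses_p2 (strategies : List String) (payoff_matrix : List (String × String × Int × Int)) (p1_strategy : String) : Prop :=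
  ∀ s2 ∈ strategies, ∃ e ∈ payoff_matrix, e.1 = p1_strategy ∧ e.2.1 = s2
instance (strategies : List String) (payoff_matrix : List (String × String × Int × Int)) (p1_strategy : String) : Decidable (Pre_best_responses_p2 strategies payoff_matrix p1_strategy) := by unfold Pre_best_responses_p2; infer_instance

def pvWitness_best_responses_p2 : List String × (List (String × String × Int × Int)) × String :=
  (["C", "D"], [("C", "C", 3, 3), ("C", "D", 0, 5), ("D", "C", 5, 0), ("D", "D", 1, 1)], "C")

def Spec_best_responses_p2 (strategies : List String) (payoff_matrix : List (String × String × Int × Int)) (p1_strategy : String) (out : List String) : Prop := out = best_responses_p2_alt strategies payoff_matrix p1_strategy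
instance (strategies : List String) (payoff_matrix : List (String × String × Int × Int)) (p1_strategy : String) (out : List String) : Decidable (Spec_best_responses_p2 strategies payoff_matrix p1_strategy out) := by unfold Spec_best_responses_p2; infer_instance

-- ===== CLAIM (what is proved, stated in full; the proofs are below) =====
def Claim_equal_best_responses_p2 : Prop := ∀ (strategies : List String) (payoff_matrix : List (String × String × Int × Int)) (p1_strategy : String), Dom_best_responses_p2 strategies payoff_matrix p1_strategy → Pre_best_responses_p2 strategies payoff_matrix p1_strategy → Spec_best_responses_p2 strategies payoff_matrix p1_strategy (best_responses_p2 strategies payoff_matrix p1_strategy)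

-- ===== LEMMAS AND PROOFS =====

-- proof-only abbreviations: the p2 payoff (0 outside Pre_), the running max, the tie filter
def pvPayD (payoff_matrix : List (String × String × Int × Int)) (p1 s2 : String) : Int :=
  (pvPay? payoff_matrix p1 s2).getD 0

def pvBest (payoff_matrix : List (String × String × Int × Int)) (p1 : String) (b : Int) (l : List String) : Int :=
  l.foldl (fun m s2 => max m (pvPayD payoff_matrix p1 s2)) b

def pvTies (payoff_matrix : List (String × String × Int × Int)) (p1 : String) (v : Int) (l : List String) : List String :=
  l.filter (fun s2 => pvPayD payoff_matrix p1 s2 = v)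

theorem pvBest_cons (pm : List (String × String × Int × Int)) (p1 s : String) (b : Int) (t : List String) :
    pvBest pm p1 b (s :: t) = pvBest pm p1 (max b (pvPayD pm p1 s)) t := rfl

theorem le_pvBest (pm : List (String × String × Int × Int)) (p1 : String) (b : Int) (t : List String) :
    b ≤ pvBest pm p1 b t := (PySem.List.le_foldl_max_int t _ b).1

theorem pvTies_cons (pm : List (String × String × Int × Int)) (p1 s : String) (v : Int) (t : List String) :
    pvTies pm p1 v (s :: t) = if pvPayD pm p1 s = v then s :: pvTies pm p1 v t else pvTies pm p1 v t := by
  simp [pvTies, List.filter_cons]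

theorem pvStepA_some (pm : List (String × String × Int × Int)) (p1 s : String) (b : Int) (ms : List String) :
    pvStepA pm p1 (some b, ms) s =
      if pvPayD pm p1 s > b then (some (pvPayD pm p1 s), [s])
      else if pvPayD pm p1 s = b then (some b, ms ++ [s]) else (some b, ms) := rfl

-- invariant of A's loop once best_payoff is set: the final state is the running max together with
-- the ties collected by a filter (the old moves survive iff the max is never beaten)
theorem pvLoopA_some (pm : List (String × String × Int × Int)) (p1 : String)
    (l : List String) (b : Int) (ms : List String) :
    l.foldl (pvStepA pm p1) (some b, ms) =
      (some (pvBest pm p1 b l),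
       (if pvBest pm p1 b l = b then ms else []) ++ pvTies pm p1 (pvBest pm p1 b l) l) := by
  induction l generalizing b ms with
  | nil => simp [pvBest, pvTies]
  | cons s t ih =>
    rw [List.foldl_cons, pvStepA_some, pvBest_cons]
    by_cases h1 : pvPayD pm p1 s > b
    · rw [if_pos h1]
      have hmax : max b (pvPayD pm p1 s) = pvPayD pm p1 s := by omega
      rw [hmax, ih, pvTies_cons]
      have hne : ¬ pvBest pm p1 (pvPayD pm p1 s) t = b := by
        have := le_pvBest pm p1 (pvPayD pm p1 s) t; omega
      rw [if_neg hne]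
      by_cases h2 : pvPayD pm p1 s = pvBest pm p1 (pvPayD pm p1 s) t
      · rw [if_pos h2.symm, if_pos h2]; simp
      · rw [if_neg (fun e => h2 e.symm), if_neg h2]
    · rw [if_neg h1]
      by_cases h2 : pvPayD pm p1 s = b
      · rw [if_pos h2]
        have hmax : max b (pvPayD pm p1 s) = b := by omega
        rw [hmax, ih, pvTies_cons]
        by_cases h3 : pvBest pm p1 b t = b
        · have h4 : pvPayD pm p1 s = pvBest pm p1 b t := by omega
          simp [h3, h4]
        · have h4 : ¬ pvPayD pm p1 s = pvBest pm p1 b t := by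
            have := le_pvBest pm p1 b t; omega
          simp [h3, h4]
      · rw [if_neg h2]
        have hmax : max b (pvPayD pm p1 s) = b := by omega
        rw [hmax, ih, pvTies_cons]
        have h4 : ¬ pvPayD pm p1 s = pvBest pm p1 b t := by
          have := le_pvBest pm p1 b t; omega
        simp [h4]

theorem best_responses_p2_eq (strategies : List String) (payoff_matrix : List (String × String × Int × Int)) (p1_strategy : String) :
    best_responses_p2 strategies payoff_matrix p1_strategy = best_responses_p2_alt strategies payoff_matrix p1_strategy := by
  cases strategies with
  | nil => rfl
  | cons s t =>
    show (List.foldl (pvStepA payoff_matrix p1_strategy)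
            (pvStepA payoff_matrix p1_strategy (none, []) s) t).2
        = pvTies payoff_matrix p1_strategy
            (pvBest payoff_matrix p1_strategy (pvPayD payoff_matrix p1_strategy s) t) (s :: t)
    have hinit : pvStepA payoff_matrix p1_strategy (none, []) s
        = (some (pvPayD payoff_matrix p1_strategy s), [s]) := rfl
    rw [hinit, pvLoopA_some, pvTies_cons]
    by_cases h : pvPayD payoff_matrix p1_strategy s
        = pvBest payoff_matrix p1_strategy (pvPayD payoff_matrix p1_strategy s) t
    · simp [← h]
    · have h' : ¬ pvBest payoff_matrix p1_strategy (pvPayD payoff_matrix p1_strategy s) t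
          = pvPayD payoff_matrix p1_strategy s := fun e => h e.symm
      simp [h, h']

-- ===== VERDICT (by name: the statement is the Claim_ definition above) =====
theorem best_responses_p2_spec : Claim_equal_best_responses_p2 := by
  intro strategies payoff_matrix p1_strategy _ _
  exact best_responses_p2_eq strategies payoff_matrix p1_strategy
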